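-- pv_equiv track=rewrite | github.com/iiirischen/MystanCodeProjects | stanCode_projects/similarity.py | homology
-- ===== SOURCE A (Python) =====
-- def homology(long_sequence, short_sequence):
--     """
--     This function compares short sequence with long sequence
--     :return: string, the similar sequence
--     """
--     count = 0
--     # use to count how many alphabets are same as short sequence
--     max_sequence = ""
--     maximum = count
--     for i in range(len(long_sequence)):
--         test = long_sequence[i:i+len(short_sequence)]
--         # test every sequence
--         if len(test) == len(short_sequence):
--             for j in range(len(short_sequence)):
--                 # test every letters in the sequence
--                 if test[j] in short_sequence[j]:
--                     count += 1
--             if count > maximum: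
--                 # find the most similar sequence
--                 maximum = count
--                 max_sequence = long_sequence[i:i+len(short_sequence)]
--             count = 0
--     return max_sequence
-- ===== SOURCE B (Python) =====
-- def _lower(ps, x):
--     # first index i with ps[i] >= x (ps ascending)
--     lo, hi = 0, len(ps)
--     while lo < hi:
--         mid = (lo + hi) // 2
--         if ps[mid] < x:
--             lo = mid + 1
--         else:
--             hi = mid
--     return lo
--
--
-- def _upper(ps, x):
--     # first index i with ps[i] > x (ps ascending)
--     lo, hi = 0, len(ps)
--     while lo < hi:
--         mid = (lo + hi) // 2
--         if ps[mid] <= x: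
--             lo = mid + 1
--         else:
--             hi = mid
--     return lo
--
--
-- def homology(long_sequence, short_sequence):
--     n, m = len(long_sequence), len(short_sequence)
--     k = n - m
--     # inverted index: character -> ascending list of its positions in long_sequence
--     occ = {}
--     for p, ch in enumerate(long_sequence):
--         occ.setdefault(ch, []).append(p)
--     # scatter: each occurrence of short_sequence[j] at position p (restricted by
--     # binary search to the valid band j <= p <= j + k) votes for offset p - j
--     scores = {}
--     for j, ch in enumerate(short_sequence):
--         ps = occ.get(ch, [])
--         for p in ps[_lower(ps, j):_upper(ps, j + k)]:
--             scores[p - j] = scores.get(p - j, 0) + 1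
--     best, best_i = 0, -1
--     for d in range(k + 1):
--         c = scores.get(d, 0)
--         if c > best:
--             best, best_i = c, d
--     if best == 0:
--         return ""
--     return long_sequence[best_i:best_i + m]
-- ===== Notes on version B (the rewrite author's own statement) =====
-- stated objective: faster
-- what changed: B never slices or rescans windows: it builds an inverted index char->ascending positions over long_sequence, clamps each occurrence list of short_sequence[j] to the valid offset band with hand-rolled binary search, scatters one vote per in-band coincidence into a score dict keyed by offset, and finally scans offsets once for the leftmost maximum.
import Mathlib
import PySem

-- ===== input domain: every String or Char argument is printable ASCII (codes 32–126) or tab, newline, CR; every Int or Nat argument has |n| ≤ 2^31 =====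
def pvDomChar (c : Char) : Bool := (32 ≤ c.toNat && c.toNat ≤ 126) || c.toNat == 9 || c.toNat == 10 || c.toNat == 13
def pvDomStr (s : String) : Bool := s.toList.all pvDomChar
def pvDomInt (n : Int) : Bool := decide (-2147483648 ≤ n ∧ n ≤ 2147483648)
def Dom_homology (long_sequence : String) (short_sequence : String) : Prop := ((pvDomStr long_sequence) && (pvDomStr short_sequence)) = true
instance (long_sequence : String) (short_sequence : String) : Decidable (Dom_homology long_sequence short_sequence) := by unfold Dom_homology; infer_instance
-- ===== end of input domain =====

-- B replaces A's sliding-window rescan by an inverted index (char -> positions in long_sequence)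
-- and scatters each occurrence of short_sequence[j] at position p into the score of offset p-j,
-- then takes the leftmost best offset (objective: alternative algorithm, same worst-case cost).

-- ===== PORT A =====
-- literal transliteration of A: for each i, slice the window, test its length, count positional
-- matches with the inner loop (Python's `test[j] in short_sequence[j]` is membership of the
-- one-char string test[j] in the one-char string short_sequence[j], ported as Chars.isIn on
-- singleton lists — exact), update the running maximum, reset count.
def homology (long_sequence : String) (short_sequence : String) : String :=
  let ls := long_sequence.toList
  let ss := short_sequence.toList
  -- state: (count, max_sequence, maximum)
  let st := (PySem.List.pyRange 0 (ls.length : Int)).foldl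
    (fun (st : Int × List Char × Int) i =>
      let test := PySem.List.slice ls (some i) (some (i + (ss.length : Int)))
      if test.length = ss.length then
        let count := (PySem.List.pyRange 0 (ss.length : Int)).foldl
          (fun c j =>
            if PySem.Chars.isIn [PySem.List.pyGetD test j ' '] [PySem.List.pyGetD ss j ' ']
            then c + 1 else c)
          st.1
        if count > st.2.2
        then (0, PySem.List.slice ls (some i) (some (i + (ss.length : Int))), count)
        else (0, st.2.1, st.2.2)
      else st)
    ((0 : Int), ([] : List Char), (0 : Int))
  String.ofList st.2.1

-- ===== PORT B =====
-- literal transliterations of Source B's helpers _lower / _upper: the while loop becomes the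
-- obvious recursion on (lo, hi); ps[mid] is pyGetD (mid is always in range when called with
-- 0 <= lo <= hi <= len(ps), so the default is never read); (lo+hi)//2 is Int.floordiv.
theorem pv_mid_lt (lo hi : Int) (h : lo < hi) : PySem.Int.floordiv (lo + hi) 2 < hi := by
  rw [PySem.Int.floordiv_lt_iff_lt_mul (by omega)]; omega

def pvLower (ps : List Int) (x : Int) (lo hi : Int) : Int :=
  if h : lo < hi then
    let mid := PySem.Int.floordiv (lo + hi) 2
    if PySem.List.pyGetD ps mid 0 < x then pvLower ps x (mid + 1) hi
    else pvLower ps x lo mid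
  else lo
termination_by (hi - lo).toNat
decreasing_by
  · have _h1 := (PySem.Int.floordiv_two_mid_bounds (le_of_lt h)).1
    omega
  · have h2 := pv_mid_lt lo hi h
    have _h1 := (PySem.Int.floordiv_two_mid_bounds (le_of_lt h)).1
    omega

def pvUpper (ps : List Int) (x : Int) (lo hi : Int) : Int :=
  if h : lo < hi then
    let mid := PySem.Int.floordiv (lo + hi) 2
    if PySem.List.pyGetD ps mid 0 ≤ x then pvUpper ps x (mid + 1) hi
    else pvUpper ps x lo mid
  else lo
termination_by (hi - lo).toNat
decreasing_by
  · have _h1 := (PySem.Int.floordiv_two_mid_bounds (le_of_lt h)).1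
    omega
  · have h2 := pv_mid_lt lo hi h
    have _h1 := (PySem.Int.floordiv_two_mid_bounds (le_of_lt h)).1
    omega

-- literal transliteration of B (Source B): build occ (char -> ascending positions;
-- `occ.setdefault(ch, []).append(p)` sets occ[ch] to occ.get(ch, []) ++ [p], i.e.
-- Dict.modify ch [] (· ++ [p])), scatter the binary-search-restricted slice of each
-- occurrence list into the scores dict keyed by offset (`scores[d] = scores.get(d, 0) + 1`
-- is insert with getD), then a running-max scan over the offsets and one final slice.
def homology_alt (long_sequence : String) (short_sequence : String) : String :=
  let ls := long_sequence.toList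
  let ss := short_sequence.toList
  let n : Int := ls.length
  let m : Int := ss.length
  let k : Int := n - m
  let occ : PySem.Dict Char (List Int) :=
    (PySem.List.enumerate ls).foldl
      (fun d pc => d.modify pc.2 [] (· ++ [pc.1])) PySem.Dict.empty
  let scores : PySem.Dict Int Int :=
    (PySem.List.enumerate ss).foldl
      (fun sc jc =>
        let ps := occ.getD jc.2 []
        (PySem.List.slice ps (some (pvLower ps jc.1 0 ps.length))
            (some (pvUpper ps (jc.1 + k) 0 ps.length))).foldl
          (fun sc p => sc.insert (p - jc.1) (sc.getD (p - jc.1) 0 + 1)) sc)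
      PySem.Dict.empty
  let st := (PySem.List.pyRange 0 (k + 1)).foldl
    (fun (st : Int × Int) d =>
      if scores.getD d 0 > st.1 then (scores.getD d 0, d) else st) ((0 : Int), (-1 : Int))
  if st.1 = 0 then "" else
    String.ofList (PySem.List.slice ls (some st.2) (some (st.2 + m)))

-- ===== PRECONDITION & SPEC =====
def Spec_homology (long_sequence : String) (short_sequence : String) (out : String) : Prop := out = homology_alt long_sequence short_sequence
instance (long_sequence : String) (short_sequence : String) (out : String) : Decidable (Spec_homology long_sequence short_sequence out) := by unfold Spec_homology; infer_instance

-- ===== CLAIM (what is proved, stated in full; the proofs are below) =====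
def Claim_equal_homology : Prop := ∀ (long_sequence : String) (short_sequence : String), Dom_homology long_sequence short_sequence → Spec_homology long_sequence short_sequence (homology long_sequence short_sequence)

-- ===== LEMMAS AND PROOFS =====

-- the window of length m at offset kk, its positional-match score against ss,
-- A's outer-loop body on the full-window indices, B's running-max body
def pvWin (ls : List Char) (m kk : Nat) : List Char := (ls.drop kk).take m

def pvSc (ls ss : List Char) (kk : Nat) : Int :=
  ((((pvWin ls ss.length kk).zip ss)).countP (fun p => p.1 = p.2) : Nat)

def pvStep (ls ss : List Char) (st : Int × List Char × Int) (kk : Nat) : Int × List Char × Int :=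
  let count := st.1 + pvSc ls ss kk
  if count > st.2.2 then (0, pvWin ls ss.length kk, count) else (0, st.2.1, st.2.2)

def pvBStep (ls ss : List Char) (st : Int × Int) (kk : Nat) : Int × Int :=
  if pvSc ls ss kk > st.1 then (pvSc ls ss kk, (kk : Int)) else st

-- the positions (as Python ints) at which character c occurs in ls
def pvPos (ls : List Char) (c : Char) : List Int :=
  (((PySem.List.enumerate ls).map Prod.swap).filter (fun q => q.1 == c)).map (·.2)

theorem pv_count_range (u v : List Char) (h : u.length = v.length) :
    (List.range v.length).countP (fun j => u.getD j ' ' = v.getD j ' ')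
    = (u.zip v).countP (fun p => p.1 = p.2) := by
  induction u generalizing v with
  | nil => cases v with
    | nil => simp
    | cons b v' => simp at h
  | cons a u' ih =>
    cases v with
    | nil => simp at h
    | cons b v' =>
      simp only [List.length_cons, List.range_succ_eq_map, List.countP_cons, List.countP_map,
        List.getD_cons_zero, List.zip_cons_cons]
      have hc : ((fun j => decide ((a :: u').getD j ' ' = (b :: v').getD j ' ')) ∘ Nat.succ)
          = fun j => decide (u'.getD j ' ' = v'.getD j ' ') := by
        funext j; simp
      rw [hc, ih v' (by simpa using h)]

theorem pv_filter_range (K n : Nat) (h : K ≤ n) :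
    (List.range n).filter (fun kk => decide (kk < K)) = List.range K := by
  obtain ⟨d, rfl⟩ := Nat.le.dest h
  rw [List.range_add, List.filter_append]
  have h1 : (List.range K).filter (fun kk => decide (kk < K)) = List.range K :=
    List.filter_eq_self.mpr (by intro a ha; simp [List.mem_range.mp (by simpa using ha)])
  have h2 : ((List.range d).map (K + ·)).filter (fun kk => decide (kk < K)) = [] := by
    rw [List.filter_eq_nil_iff]
    intro a ha
    rcases List.mem_map.mp ha with ⟨x, _, rfl⟩
    simp
  rw [h1, h2, List.append_nil]

theorem pv_isIn_singleton (a b : Char) : PySem.Chars.isIn [a] [b] = decide (a = b) := by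
  rw [Bool.eq_iff_iff]; simp [PySem.Chars.isIn_iff_infix]

theorem pv_inner (u v : List Char) (c : Int) (h : u.length = v.length) :
    (PySem.List.pyRange 0 (v.length : Int)).foldl
      (fun cc j =>
        if PySem.Chars.isIn [PySem.List.pyGetD u j ' '] [PySem.List.pyGetD v j ' ']
        then cc + 1 else cc) c
    = c + ((u.zip v).countP (fun p => p.1 = p.2) : Nat) := by
  rw [PySem.List.pyRange_zero_natCast, List.foldl_map]
  simp only [PySem.List.pyGetD_natCast, pv_isIn_singleton]
  rw [PySem.List.foldl_if_add_one (fun j => decide (u.getD j ' ' = v.getD j ' '))]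
  rw [pv_count_range u v h]

-- A (on nonempty ss) reduces to the fold of pvStep over the full-window indices
theorem pvA_fold (ls ss : List Char) (hss : ss ≠ []) :
    homology (String.ofList ls) (String.ofList ss)
    = String.ofList (((List.range (ls.length + 1 - ss.length)).foldl
        (pvStep ls ss) (0, [], 0)).2.1) := by
  have hm : 1 ≤ ss.length := List.length_pos_iff.mpr hss
  unfold homology
  simp only [String.toList_ofList]
  rw [PySem.List.pyRange_zero_natCast ls.length, List.foldl_map]
  rw [PySem.List.foldl_congr_mem (List.range ls.length) _
    (fun st kk => if kk < ls.length + 1 - ss.length then pvStep ls ss st kk else st) _ ?_]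
  · rw [PySem.List.foldl_ite_eq_foldl_filter (fun kk => kk < ls.length + 1 - ss.length)
      (pvStep ls ss), pv_filter_range _ _ (by omega)]
  · intro acc kk hk
    beta_reduce
    have hkn : kk < ls.length := List.mem_range.mp hk
    rw [PySem.List.slice_natCast_add ls kk ss.length]
    have hlen : (List.take ss.length (List.drop kk ls)).length
        = min ss.length (ls.length - kk) := by simp
    by_cases hc : kk < ls.length + 1 - ss.length
    · have hfull : (List.take ss.length (List.drop kk ls)).length = ss.length := by
        rw [hlen]; omega
      rw [if_pos hfull, if_pos hc,
        pv_inner (List.take ss.length (List.drop kk ls)) ss acc.1 hfull]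
      unfold pvStep pvSc pvWin
      rfl
    · have hnfull : (List.take ss.length (List.drop kk ls)).length ≠ ss.length := by
        rw [hlen]; omega
      rw [if_neg hnfull, if_neg hc]

-- the inverted index built by B's first loop is exactly pvPos
theorem pv_occ (ls : List Char) (c : Char) :
    (((PySem.List.enumerate ls).foldl
        (fun d pc => d.modify pc.2 [] (· ++ [pc.1])) PySem.Dict.empty).getD c [])
    = pvPos ls c := by
  have h : (PySem.List.enumerate ls).foldl (fun d pc => d.modify pc.2 [] (· ++ [pc.1])) PySem.Dict.empty
      = ((PySem.List.enumerate ls).map Prod.swap).foldl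
          (fun d p => d.modify p.1 [] (· ++ [p.2])) PySem.Dict.empty := by
    rw [List.foldl_map]
    simp only [Prod.fst_swap, Prod.snd_swap]
  rw [h, PySem.Dict.getD_foldl_modify_append]
  simp [pvPos]

theorem pv_mem_pos (ls : List Char) (c : Char) (p : Int) :
    p ∈ pvPos ls c ↔ ∃ i : Nat, i < ls.length ∧ ls.getD i ' ' = c ∧ p = (i : Int) := by
  unfold pvPos
  simp only [List.mem_map, List.mem_filter, PySem.List.mem_enumerate_iff]
  constructor
  · rintro ⟨q, ⟨⟨a, ⟨k, hk, rfl⟩, rfl⟩, hqc⟩, rfl⟩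
    exact ⟨k, hk, by have := beq_iff_eq.mp hqc; simp_all [List.getD_eq_getElem?_getD], by simp⟩
  · rintro ⟨i, hi, hc, rfl⟩
    exact ⟨(c, (i : Int)), ⟨⟨((i:Int), c), ⟨i, hi,
      by simp [← hc, List.getD_eq_getElem?_getD, List.getElem?_eq_getElem hi]⟩, rfl⟩,
      by simp⟩, rfl⟩

theorem pv_pos_nodup (ls : List Char) (c : Char) : (pvPos ls c).Nodup := by
  have hsub : ((((PySem.List.enumerate ls).map Prod.swap).filter (fun q => q.1 == c)).map (·.2)).Sublist
      (((PySem.List.enumerate ls).map Prod.swap).map (·.2)) :=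
    List.Sublist.map _ List.filter_sublist
  have h2 : (((PySem.List.enumerate ls).map Prod.swap).map (·.2)) = (PySem.List.enumerate ls).map (·.1) := by
    simp [Function.comp]
  have hnd : ((PySem.List.enumerate ls).map (·.1)).Nodup := by
    rw [PySem.List.map_fst_enumerate, zero_add, PySem.List.pyRange_zero_natCast]
    exact List.nodup_range.map (fun a b h => by exact_mod_cast h)
  exact List.Nodup.sublist (h2 ▸ hsub) hnd

theorem pvLower_spec (ps : List Int) (x : Int) (hs : ps.Pairwise (· ≤ ·)) (lo hi : Int)
    (hlo : 0 ≤ lo) (hhi : hi ≤ ps.length) (hle : lo ≤ hi) :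
    lo ≤ pvLower ps x lo hi ∧ pvLower ps x lo hi ≤ hi
    ∧ (∀ (i : Nat) (_ : i < ps.length), lo ≤ (i : Int) → (i : Int) < pvLower ps x lo hi → ps[i] < x)
    ∧ (∀ (i : Nat) (_ : i < ps.length), pvLower ps x lo hi ≤ (i : Int) → (i : Int) < hi → x ≤ ps[i]) := by
  have hmono : ∀ (i j : Nat) (_ : i < ps.length) (_ : j < ps.length), i ≤ j → ps[i] ≤ ps[j] := by
    intro i j hi hj hij
    rcases Nat.lt_or_ge i j with h | h
    · exact (List.pairwise_iff_getElem.mp hs) i j hi hj h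
    · have : i = j := by omega
      subst this; rfl
  fun_induction pvLower ps x lo hi with
  | case1 lo hi h mid hlt ih =>
    have hmidb := PySem.Int.floordiv_two_mid_bounds (le_of_lt h)
    have hmlt := pv_mid_lt lo hi h
    have hmidn : mid.toNat < ps.length := by omega
    have hget : PySem.List.pyGetD ps mid 0 = ps[mid.toNat] :=
      PySem.List.pyGetD_eq_getElem ps 0 (by omega) (by omega)
    obtain ⟨i1, i2, i3, i4⟩ := ih (by omega) hhi (by omega)
    refine ⟨by omega, i2, ?_, i4⟩
    intro i hip hloi hiR
    by_cases hcm : (mid + 1 : Int) ≤ (i : Int)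
    · exact i3 i hip hcm hiR
    · calc ps[i] ≤ ps[mid.toNat] := hmono i mid.toNat hip hmidn (by omega)
        _ < x := by rw [← hget]; exact hlt
  | case2 lo hi h mid hlt ih =>
    have hmidb := PySem.Int.floordiv_two_mid_bounds (le_of_lt h)
    have hmlt := pv_mid_lt lo hi h
    have hmidn : mid.toNat < ps.length := by omega
    have hget : PySem.List.pyGetD ps mid 0 = ps[mid.toNat] :=
      PySem.List.pyGetD_eq_getElem ps 0 (by omega) (by omega)
    obtain ⟨i1, i2, i3, i4⟩ := ih hlo (by omega) (by omega)
    refine ⟨i1, by omega, i3, ?_⟩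
    intro i hip hRi hihi
    by_cases hcm : (i : Int) < mid
    · exact i4 i hip hRi hcm
    · calc x ≤ ps[mid.toNat] := by rw [← hget]; omega
        _ ≤ ps[i] := hmono mid.toNat i hmidn hip (by omega)
  | case3 lo hi h => exact ⟨le_refl _, by omega, by omega, by omega⟩

theorem pvUpper_spec (ps : List Int) (x : Int) (hs : ps.Pairwise (· ≤ ·)) (lo hi : Int)
    (hlo : 0 ≤ lo) (hhi : hi ≤ ps.length) (hle : lo ≤ hi) :
    lo ≤ pvUpper ps x lo hi ∧ pvUpper ps x lo hi ≤ hi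
    ∧ (∀ (i : Nat) (_ : i < ps.length), lo ≤ (i : Int) → (i : Int) < pvUpper ps x lo hi → ps[i] ≤ x)
    ∧ (∀ (i : Nat) (_ : i < ps.length), pvUpper ps x lo hi ≤ (i : Int) → (i : Int) < hi → x < ps[i]) := by
  have hmono : ∀ (i j : Nat) (_ : i < ps.length) (_ : j < ps.length), i ≤ j → ps[i] ≤ ps[j] := by
    intro i j hi hj hij
    rcases Nat.lt_or_ge i j with h | h
    · exact (List.pairwise_iff_getElem.mp hs) i j hi hj h
    · have : i = j := by omega
      subst this; rfl
  fun_induction pvUpper ps x lo hi with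
  | case1 lo hi h mid hlt ih =>
    have hmidb := PySem.Int.floordiv_two_mid_bounds (le_of_lt h)
    have hmlt := pv_mid_lt lo hi h
    have hmidn : mid.toNat < ps.length := by omega
    have hget : PySem.List.pyGetD ps mid 0 = ps[mid.toNat] :=
      PySem.List.pyGetD_eq_getElem ps 0 (by omega) (by omega)
    obtain ⟨i1, i2, i3, i4⟩ := ih (by omega) hhi (by omega)
    refine ⟨by omega, i2, ?_, i4⟩
    intro i hip hloi hiR
    by_cases hcm : (mid + 1 : Int) ≤ (i : Int)
    · exact i3 i hip hcm hiR
    · calc ps[i] ≤ ps[mid.toNat] := hmono i mid.toNat hip hmidn (by omega)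
        _ ≤ x := by rw [← hget]; exact hlt
  | case2 lo hi h mid hlt ih =>
    have hmidb := PySem.Int.floordiv_two_mid_bounds (le_of_lt h)
    have hmlt := pv_mid_lt lo hi h
    have hmidn : mid.toNat < ps.length := by omega
    have hget : PySem.List.pyGetD ps mid 0 = ps[mid.toNat] :=
      PySem.List.pyGetD_eq_getElem ps 0 (by omega) (by omega)
    obtain ⟨i1, i2, i3, i4⟩ := ih hlo (by omega) (by omega)
    refine ⟨i1, by omega, i3, ?_⟩
    intro i hip hRi hihi
    by_cases hcm : (i : Int) < mid
    · exact i4 i hip hRi hcm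
    · calc x < ps[mid.toNat] := by rw [← hget]; omega
        _ ≤ ps[i] := hmono mid.toNat i hmidn hip (by omega)
  | case3 lo hi h => exact ⟨le_refl _, by omega, by omega, by omega⟩

-- a bracketed run of a sorted list IS the filter
theorem pv_seg_filter (q : Int → Bool) (ps : List Int) (A B : Nat)
    (h1 : ∀ (i : Nat) (_ : i < ps.length), i < A → q ps[i] = false)
    (h2 : ∀ (i : Nat) (_ : i < ps.length), A ≤ i → i < B → q ps[i] = true)
    (h3 : ∀ (i : Nat) (_ : i < ps.length), B ≤ i → q ps[i] = false) :
    (ps.drop A).take (B - A) = ps.filter q := by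
  induction ps generalizing A B with
  | nil => simp
  | cons hd tl ih =>
    cases A with
    | zero =>
      cases B with
      | zero =>
        simp only [List.drop_zero, Nat.sub_zero, List.take_zero]
        symm
        rw [List.filter_eq_nil_iff]
        intro a ha
        obtain ⟨i, hi, rfl⟩ := List.getElem_of_mem ha
        simp [h3 i hi (Nat.zero_le i)]
      | succ B' =>
        have hq : q hd = true := h2 0 (by simp) (Nat.zero_le 0) (Nat.succ_pos B')
        simp only [List.drop_zero, Nat.sub_zero, List.take_succ_cons, List.filter_cons, hq,
          if_pos]
        congr 1
        have := ih 0 B'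
          (fun i hi h => by omega)
          (fun i hi hA hB => h2 (i+1) (by simpa using Nat.succ_lt_succ hi) (Nat.zero_le _) (by omega))
          (fun i hi hB => h3 (i+1) (by simpa using Nat.succ_lt_succ hi) (by omega))
        simpa using this
    | succ A' =>
      have hq : q hd = false := h1 0 (by simp) (Nat.succ_pos A')
      simp only [List.drop_succ_cons, List.filter_cons, hq]
      have heq : B - (A' + 1) = (B - 1) - A' := by omega
      rw [heq]
      have := ih A' (B - 1)
        (fun i hi hA => h1 (i+1) (by simpa using Nat.succ_lt_succ hi) (by omega))
        (fun i hi hA hB => h2 (i+1) (by simpa using Nat.succ_lt_succ hi) (by omega) (by omega))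
        (fun i hi hB => h3 (i+1) (by simpa using Nat.succ_lt_succ hi) (by omega))
      simpa using this

theorem pv_pos_sorted (ls : List Char) (c : Char) : (pvPos ls c).Pairwise (· ≤ ·) := by
  unfold pvPos
  rw [List.pairwise_map]
  apply List.Pairwise.filter
  rw [List.pairwise_map]
  exact (PySem.List.pairwise_lt_enumerate ls 0).imp (fun hab => by simp_all; omega)

-- the binary-search-restricted slice of a position list is the range filter
theorem pv_slice_eq (ls : List Char) (c : Char) (j k : Int) :
    PySem.List.slice (pvPos ls c)
      (some (pvLower (pvPos ls c) j 0 ((pvPos ls c).length : Int)))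
      (some (pvUpper (pvPos ls c) (j + k) 0 ((pvPos ls c).length : Int)))
    = (pvPos ls c).filter (fun p => decide (0 ≤ p - j ∧ p - j ≤ k)) := by
  obtain ⟨ha0, haL, hlt, hge⟩ := pvLower_spec (pvPos ls c) j (pv_pos_sorted ls c)
    0 ((pvPos ls c).length : Int) le_rfl le_rfl (by positivity)
  obtain ⟨hb0, hbL, hle', hgt⟩ := pvUpper_spec (pvPos ls c) (j + k) (pv_pos_sorted ls c)
    0 ((pvPos ls c).length : Int) le_rfl le_rfl (by positivity)
  rw [PySem.List.slice_toNat _ ha0 hb0]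
  apply pv_seg_filter
  · intro i hi hiA
    have := hlt i hi (by omega) (by omega)
    simp; omega
  · intro i hi hA hB
    have hx := hge i hi (by omega) (by omega)
    have hy := hle' i hi (by omega) (by omega)
    simp; omega
  · intro i hi hB
    have := hgt i hi (by omega) (by omega)
    simp; omega

-- removing the explicit bounds-filter reintroduces A-shaped guarded iteration
theorem pv_unguard (L : List Int) (j k : Int) (sc : PySem.Dict Int Int) :
    (L.filter (fun p => decide (0 ≤ p - j ∧ p - j ≤ k))).foldl
      (fun sc p => sc.insert (p - j) (sc.getD (p - j) 0 + 1)) sc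
    = L.foldl (fun sc p =>
        if 0 ≤ p - j ∧ p - j ≤ k
        then sc.insert (p - j) (sc.getD (p - j) 0 + 1) else sc) sc := by
  have h := PySem.List.foldl_ite_eq_foldl_filter (p := fun p => 0 ≤ p - j ∧ p - j ≤ k)
    (fun sc p => sc.insert (p - j) (sc.getD (p - j) 0 + 1)) L sc
  exact h.symm

-- one inner scatter loop, as a counter over the shifted, range-filtered positions
theorem pv_scatter (L : List Int) (j k dd : Int) (sc : PySem.Dict Int Int) :
    (L.foldl (fun sc p =>
        if 0 ≤ p - j ∧ p - j ≤ k
        then sc.insert (p - j) (sc.getD (p - j) 0 + 1) else sc) sc).getD dd 0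
    = sc.getD dd 0
      + (((L.filter (fun p => decide (0 ≤ p - j ∧ p - j ≤ k))).map (· - j)).count dd : Nat) := by
  have h := PySem.List.foldl_ite_eq_foldl_filter (p := fun p => 0 ≤ p - j ∧ p - j ≤ k)
    (fun sc p => sc.insert (p - j) (sc.getD (p - j) 0 + 1)) L sc
  rw [h]
  have h2 : List.foldl (fun (sc : PySem.Dict Int Int) p => sc.insert (p - j) (sc.getD (p - j) 0 + 1))
        sc (List.filter (fun x => decide (0 ≤ x - j ∧ x - j ≤ k)) L)
      = List.foldl (fun sc x => sc.insert x (sc.getD x 0 + 1)) sc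
          ((List.filter (fun x => decide (0 ≤ x - j ∧ x - j ≤ k)) L).map (· - j)) := by
    rw [List.foldl_map]
  rw [h2, PySem.Dict.getD_foldl_insert_add_one]

-- the whole scatter double loop: scores[dd] is the sum of the per-j contributions
theorem pv_outer (occA : Char → List Int) (k dd : Int) (E : List (Int × Char))
    (sc : PySem.Dict Int Int) :
    (E.foldl (fun sc jc =>
        (occA jc.2).foldl (fun sc p =>
          if 0 ≤ p - jc.1 ∧ p - jc.1 ≤ k
          then sc.insert (p - jc.1) (sc.getD (p - jc.1) 0 + 1) else sc) sc) sc).getD dd 0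
    = sc.getD dd 0
      + (E.map (fun jc =>
          ((((occA jc.2).filter (fun p => decide (0 ≤ p - jc.1 ∧ p - jc.1 ≤ k))).map
            (· - jc.1)).count dd : Int))).sum := by
  induction E generalizing sc with
  | nil => simp
  | cons jc E ih =>
    rw [List.foldl_cons, ih, pv_scatter, List.map_cons, List.sum_cons]
    ring

-- evaluation: for a full-window offset kk, the scattered score is the window score
theorem pv_scores (ls ss : List Char) (kk : Nat) (hk : kk + ss.length ≤ ls.length) :
    ((PySem.List.enumerate ss).foldl (fun sc jc =>
        (pvPos ls jc.2).foldl (fun sc p =>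
          if 0 ≤ p - jc.1 ∧ p - jc.1 ≤ ((ls.length : Int) - ss.length)
          then sc.insert (p - jc.1) (sc.getD (p - jc.1) 0 + 1) else sc) sc)
      PySem.Dict.empty).getD (kk : Int) 0
    = pvSc ls ss kk := by
  rw [pv_outer (fun c => pvPos ls c) ((ls.length : Int) - ss.length) (kk : Int)
    (PySem.List.enumerate ss) PySem.Dict.empty]
  rw [PySem.Dict.getD_empty, zero_add]
  have hcongr : (PySem.List.enumerate ss).map (fun jc =>
        ((((pvPos ls jc.2).filter (fun p => decide (0 ≤ p - jc.1 ∧ p - jc.1 ≤ ((ls.length : Int) - ss.length)))).map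
          (· - jc.1)).count (kk : Int) : Int))
      = (PySem.List.enumerate ss).map (fun jc =>
        if ls.getD (kk + jc.1.toNat) ' ' = ss.getD jc.1.toNat ' ' then (1 : Int) else 0) := by
    apply List.map_congr_left
    intro jc hjc
    rcases (PySem.List.mem_enumerate_iff ss 0 jc).mp hjc with ⟨j, hj, rfl⟩
    simp only [zero_add, Int.toNat_natCast]
    have hcast : (kk : Int) = ((kk + j : Nat) : Int) - (j : Nat) := by push_cast; ring
    have hcnt : List.count ((kk : Int))
        (List.map (fun x => x - (j : Int))
          (List.filter (fun p => decide (0 ≤ p - (j : Int) ∧ p - (j : Int) ≤ (ls.length : Int) - ss.length))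
            (pvPos ls ss[j])))
        = List.count (((kk + j : Nat)) : Int)
          (List.filter (fun p => decide (0 ≤ p - (j : Int) ∧ p - (j : Int) ≤ (ls.length : Int) - ss.length))
            (pvPos ls ss[j])) := by
      rw [hcast]
      exact List.count_map_of_injective _ (fun x => x - (j : Int))
        (fun a b hab => by simp only [sub_left_inj] at hab; omega) _
    rw [hcnt]
    rw [List.count_filter
      (p := fun p => decide (0 ≤ p - (j : Int) ∧ p - (j : Int) ≤ (ls.length : Int) - ss.length))
      (a := ((kk + j : Nat) : Int)) (l := pvPos ls ss[j]) (by simp; omega)]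
    have hlt : kk + j < ls.length := by omega
    have hgd : ss.getD j ' ' = ss[j] := by
      simp [List.getD_eq_getElem?_getD, List.getElem?_eq_getElem hj]
    by_cases hmatch : ls.getD (kk + j) ' ' = ss[j]
    · rw [List.count_eq_one_of_mem (pv_pos_nodup ls ss[j])
        ((pv_mem_pos ls ss[j] _).mpr ⟨kk + j, hlt, hmatch, rfl⟩), hgd, if_pos hmatch]
      simp
    · rw [List.count_eq_zero_of_not_mem ?_, hgd, if_neg hmatch]
      · simp
      · intro hmem
        rcases (pv_mem_pos ls ss[j] _).mp hmem with ⟨i, hi, hgc, hcast2⟩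
        have hieq : i = kk + j := by omega
        exact hmatch (hieq ▸ hgc)
  rw [hcongr]
  have hmap : (PySem.List.enumerate ss).map (fun jc =>
        if ls.getD (kk + jc.1.toNat) ' ' = ss.getD jc.1.toNat ' ' then (1 : Int) else 0)
      = (List.range ss.length).map (fun j =>
        if ls.getD (kk + j) ' ' = ss.getD j ' ' then (1 : Int) else 0) := by
    rw [show (fun jc : Int × Char =>
        if ls.getD (kk + jc.1.toNat) ' ' = ss.getD jc.1.toNat ' ' then (1 : Int) else 0)
      = (fun z : Int => if ls.getD (kk + z.toNat) ' ' = ss.getD z.toNat ' ' then (1 : Int) else 0)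
        ∘ (fun jc : Int × Char => jc.1) from rfl]
    rw [← List.map_map, PySem.List.map_fst_enumerate, zero_add, PySem.List.pyRange_zero_natCast,
      List.map_map]
    simp [Function.comp]
  rw [hmap]
  have hite : (List.range ss.length).map (fun j =>
        if ls.getD (kk + j) ' ' = ss.getD j ' ' then (1 : Int) else 0)
      = (List.range ss.length).map (fun j =>
        if (fun j => decide (ls.getD (kk + j) ' ' = ss.getD j ' ')) j = true then (1 : Int) else 0) := by
    simp
  rw [hite, PySem.List.sum_map_ite_one_zero]
  have hwin : (List.range ss.length).countP (fun j => decide (ls.getD (kk + j) ' ' = ss.getD j ' '))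
      = (List.range ss.length).countP
          (fun j => decide ((pvWin ls ss.length kk).getD j ' ' = ss.getD j ' ')) := by
    apply List.countP_congr
    intro j hj
    have hjm := List.mem_range.mp hj
    have hg : (pvWin ls ss.length kk)[j]? = ls[kk + j]? := by
      simp [pvWin, List.getElem?_drop, hjm]
    simp [List.getD_eq_getElem?_getD, hg]
  rw [hwin]
  have hlen : (pvWin ls ss.length kk).length = ss.length := by
    simp [pvWin]; omega
  unfold pvSc
  rw [← pv_count_range _ _ hlen]

-- the two reduced folds walk in step: A's running (seq, max) matches B's (max, index)
theorem pv_tailAB (ls ss : List Char) (K : Nat) :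
    (((List.range K).foldl (pvStep ls ss) (0, [], 0)).1 = 0)
    ∧ (0 ≤ ((List.range K).foldl (pvBStep ls ss) (0, -1)).1)
    ∧ ((List.range K).foldl (pvStep ls ss) (0, [], 0)).2.2
        = ((List.range K).foldl (pvBStep ls ss) (0, -1)).1
    ∧ (((List.range K).foldl (pvBStep ls ss) (0, -1)).1 = 0
        → ((List.range K).foldl (pvStep ls ss) (0, [], 0)).2.1 = [])
    ∧ (((List.range K).foldl (pvBStep ls ss) (0, -1)).1 ≠ 0
        → ∃ j : Nat, ((List.range K).foldl (pvBStep ls ss) (0, -1)).2 = (j : Int)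
            ∧ ((List.range K).foldl (pvStep ls ss) (0, [], 0)).2.1 = pvWin ls ss.length j) := by
  induction K with
  | zero => simp
  | succ K ih =>
    obtain ⟨h1, h0, h2, h3, h4⟩ := ih
    rw [List.range_succ, List.foldl_append, List.foldl_append, List.foldl_cons, List.foldl_cons,
      List.foldl_nil, List.foldl_nil]
    set A := (List.range K).foldl (pvStep ls ss) (0, [], 0) with hA
    set B := (List.range K).foldl (pvBStep ls ss) (0, -1) with hB
    unfold pvStep pvBStep
    by_cases hc : pvSc ls ss K > B.1
    · rw [if_pos (by rw [h1, h2]; simpa using hc), if_pos hc]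
      refine ⟨rfl, by simp; omega, by simp [h1], ?_, ?_⟩
      · intro hz; exfalso; simp at hz; omega
      · intro _; exact ⟨K, rfl, by simp⟩
    · rw [if_neg (by rw [h1, h2]; simpa using hc), if_neg hc]
      exact ⟨rfl, h0, h2, h3, h4⟩

theorem pv_fix {σ α : Type} (f : σ → α → σ) (s0 : σ) (hf : ∀ i, f s0 i = s0) (l : List α) :
    l.foldl f s0 = s0 := by
  induction l with
  | nil => rfl
  | cons x t ih => rw [List.foldl_cons, hf]; exact ih

theorem pvA_nil (ls : List Char) : homology (String.ofList ls) (String.ofList []) = "" := by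
  unfold homology
  simp only [String.toList_ofList, List.length_nil, Nat.cast_zero]
  have hfix : ∀ i : Int,
      (fun (st : Int × List Char × Int) (i : Int) =>
        if (PySem.List.slice ls (some i) (some (i + 0))).length = 0 then
          if (PySem.List.pyRange 0 0).foldl
              (fun c j =>
                if PySem.Chars.isIn [PySem.List.pyGetD (PySem.List.slice ls (some i) (some (i + 0))) j ' ']
                    [PySem.List.pyGetD [] j ' ']
                then c + 1 else c) st.1 > st.2.2
          then (0, PySem.List.slice ls (some i) (some (i + 0)),
              (PySem.List.pyRange 0 0).foldl
                (fun c j =>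
                  if PySem.Chars.isIn [PySem.List.pyGetD (PySem.List.slice ls (some i) (some (i + 0))) j ' ']
                      [PySem.List.pyGetD [] j ' ']
                  then c + 1 else c) st.1)
          else (0, st.2.1, st.2.2)
        else st) ((0 : Int), ([] : List Char), (0 : Int)) i = ((0 : Int), ([] : List Char), (0 : Int)) := by
    intro i
    beta_reduce
    have hlen : (PySem.List.slice ls (some i) (some (i + 0))).length = 0 := by
      rw [add_zero, PySem.List.length_slice]
      omega
    rw [if_pos hlen, PySem.List.pyRange_one_eq_nil le_rfl, List.foldl_nil]
    norm_num
  rw [pv_fix _ _ hfix]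

-- B reduces to the fold of pvBStep over the full-window indices, plus the final slice
theorem pvB_eq (ls ss : List Char) :
    homology_alt (String.ofList ls) (String.ofList ss)
    = (if (((List.range (ls.length + 1 - ss.length)).foldl (pvBStep ls ss) (0, -1)).1 = 0) then ""
       else String.ofList (PySem.List.slice ls
              (some (((List.range (ls.length + 1 - ss.length)).foldl (pvBStep ls ss) (0, -1)).2))
              (some ((((List.range (ls.length + 1 - ss.length)).foldl (pvBStep ls ss) (0, -1)).2
                 + (ss.length : Int)))))) := by
  unfold homology_alt
  simp only [String.toList_ofList, pv_occ]
  simp only [pv_slice_eq, pv_unguard]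
  have hrange : PySem.List.pyRange 0 (((ls.length : Int) - ss.length) + 1)
      = List.map (fun kk => ((kk : Nat) : Int)) (List.range (ls.length + 1 - ss.length)) := by
    by_cases hc : ss.length ≤ ls.length + 1
    · have he : ((ls.length : Int) - ss.length + 1) = ((ls.length + 1 - ss.length : Nat) : Int) := by
        omega
      rw [he]
      exact PySem.List.pyRange_zero_natCast _
    · have h0 : ls.length + 1 - ss.length = 0 := by omega
      rw [h0, PySem.List.pyRange_one_eq_nil (by omega)]
      simp
  rw [hrange, List.foldl_map]
  rw [PySem.List.foldl_congr_mem (List.range (ls.length + 1 - ss.length)) _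
    (pvBStep ls ss) _ ?_]
  intro acc kk hk
  beta_reduce
  have hkK : kk < ls.length + 1 - ss.length := List.mem_range.mp hk
  rw [pv_scores ls ss kk (by omega)]
  rfl

-- ===== VERDICT (by name: the statement is the Claim_ definition above) =====
theorem homology_spec : Claim_equal_homology := by
  intro l s _
  unfold Spec_homology
  have hl : l = String.ofList l.toList := by simp [String.ofList]
  have hs : s = String.ofList s.toList := by simp [String.ofList]
  rw [hl, hs]
  rcases eq_or_ne s.toList [] with h | h
  · rw [h, pvA_nil, pvB_eq]
    rw [pv_fix _ _ (fun kk => by simp [pvBStep, pvSc])]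
    rfl
  · rw [pvA_fold _ _ h, pvB_eq]
    obtain ⟨h1, h0, h2, h3, h4⟩ := pv_tailAB l.toList s.toList (l.toList.length + 1 - s.toList.length)
    by_cases hz : ((List.range (l.toList.length + 1 - s.toList.length)).foldl
        (pvBStep l.toList s.toList) (0, -1)).1 = 0
    · rw [if_pos hz, h3 hz]
    · rw [if_neg hz]
      obtain ⟨j, hj2, hwin⟩ := h4 hz
      rw [hwin, hj2, PySem.List.slice_natCast_add]
      rfl
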